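-- pv_equiv track=rewrite | github.com/LandynMoreno/EE461L | flask/encrypt.py | customEncrypt
-- ===== SOURCE A (Python) =====
-- def customEncrypt(inputText, N, D):
--     reverse = inputText[::-1]
--     shift = N*D
--     result = ""
--     for letter in reverse:
--         num = ord(letter) -34 +shift
--         num = num % 93
--         num = num+34
--         result = result + chr(num)
--     return result
-- ===== SOURCE B (Python) =====
-- def customEncrypt(inputText, N, D):
--     k = (N * D) % 93
--     def enc(s):
--         if len(s) <= 1:
--             return ''.join(chr((ord(c) - 34 + k) % 93 + 34) for c in s)
--         m = len(s) // 2
--         return enc(s[m:]) + enc(s[:m])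
--     return enc(inputText)
-- ===== Notes on version B (the rewrite author's own statement) =====
-- stated objective: alternative
-- what changed: Replaces A's reverse-then-accumulate loop with a divide-and-conquer recursion that swaps the two halves at each split (reversal emerges from the recursion) and reduces the shift modulo 93 once up front.
import Mathlib
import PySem

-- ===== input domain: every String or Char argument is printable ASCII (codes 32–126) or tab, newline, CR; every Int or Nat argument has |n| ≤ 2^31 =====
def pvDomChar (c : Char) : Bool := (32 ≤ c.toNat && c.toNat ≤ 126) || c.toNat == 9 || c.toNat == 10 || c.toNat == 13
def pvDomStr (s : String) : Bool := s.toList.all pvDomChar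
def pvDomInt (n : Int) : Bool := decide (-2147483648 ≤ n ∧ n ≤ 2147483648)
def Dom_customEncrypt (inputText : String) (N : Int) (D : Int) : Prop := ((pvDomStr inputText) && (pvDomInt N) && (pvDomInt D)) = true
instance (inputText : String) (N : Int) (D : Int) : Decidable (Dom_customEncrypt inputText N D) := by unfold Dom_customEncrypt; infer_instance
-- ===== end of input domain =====

-- B reverses by a divide-and-conquer recursion that swaps halves (instead of A's reverse-then-append loop)
-- and reduces the shift modulo 93 once up front; alternative decomposition, not claimed faster.


-- ===== PORT A =====
-- Literal port of A: reverse the string, then an accumulation loop appending chr((ord(c)-34+N*D)%93+34).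
def customEncrypt (inputText : String) (N : Int) (D : Int) : String :=
  let reverse := inputText.toList.reverse
  let shift := N * D
  let result := reverse.foldl (fun acc letter =>
    let num := (letter.toNat : Int) - 34 + shift
    let num := PySem.Int.mod num 93
    let num := num + 34
    acc ++ [Char.ofNat num.toNat]) []
  String.ofList result

-- ===== PORT B =====
-- Port of B's inner 'enc': if len(s) <= 1 map the shift over s, else recurse on the two
-- halves in swapped order (s[m:] then s[:m] with m = len(s)//2).
def encHalves (k : Int) (s : List Char) : List Char :=
  if s.length ≤ 1 then
    s.map (fun c => Char.ofNat (PySem.Int.mod ((c.toNat : Int) - 34 + k) 93 + 34).toNat)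
  else
    encHalves k (s.drop (s.length / 2)) ++ encHalves k (s.take (s.length / 2))
termination_by s.length
decreasing_by
  · simp only [List.length_drop]; omega
  · simp only [List.length_take]; omega

def customEncrypt_alt (inputText : String) (N : Int) (D : Int) : String :=
  let k := PySem.Int.mod (N * D) 93
  String.ofList (encHalves k inputText.toList)

-- ===== PRECONDITION & SPEC =====
def Spec_customEncrypt (inputText : String) (N : Int) (D : Int) (out : String) : Prop := out = customEncrypt_alt inputText N D
instance (inputText : String) (N : Int) (D : Int) (out : String) : Decidable (Spec_customEncrypt inputText N D out) := by unfold Spec_customEncrypt; infer_instance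

-- ===== CLAIM (what is proved, stated in full; the proofs are below) =====
def Claim_equal_customEncrypt : Prop := ∀ (inputText : String) (N : Int) (D : Int), Dom_customEncrypt inputText N D → Spec_customEncrypt inputText N D (customEncrypt inputText N D)

-- ===== LEMMAS AND PROOFS =====

-- The halving recursion produces the per-character map of the reversed list.
theorem encHalves_eq_reverse_map (k : Int) (s : List Char) :
    encHalves k s = s.reverse.map (fun c => Char.ofNat (PySem.Int.mod ((c.toNat : Int) - 34 + k) 93 + 34).toNat) := by
  induction s using encHalves.induct with
  | case1 s h =>
    rw [encHalves]
    simp only [h, if_true]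
    interval_cases hl : s.length
    · simp [List.length_eq_zero_iff.mp hl]
    · obtain ⟨c, rfl⟩ := List.length_eq_one_iff.mp hl
      simp
  | case2 s h ih1 ih2 =>
    rw [encHalves]
    simp only [h, if_false]
    rw [ih1, ih2, ← List.map_append, ← List.reverse_append, List.take_append_drop]

-- Reducing the shift modulo 93 before adding does not change the residue.
theorem mod_shift_reduce (x k : Int) :
    PySem.Int.mod (x + PySem.Int.mod k 93) 93 = PySem.Int.mod (x + k) 93 := by
  simp only [PySem.Int.mod_eq_emod_of_pos (by norm_num : (0:Int) < 93)]
  omega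

theorem customEncrypt_eq_alt (inputText : String) (N : Int) (D : Int) :
    customEncrypt inputText N D = customEncrypt_alt inputText N D := by
  simp only [customEncrypt, customEncrypt_alt, encHalves_eq_reverse_map,
    PySem.List.foldl_append_singleton_eq_map, List.nil_append]
  congr 1
  apply List.map_congr_left
  intro c _
  rw [mod_shift_reduce]

-- ===== VERDICT (by name: the statement is the Claim_ definition above) =====
theorem customEncrypt_spec : Claim_equal_customEncrypt := by
  intro inputText N D _
  show customEncrypt inputText N D = customEncrypt_alt inputText N D
  exact customEncrypt_eq_alt inputText N D
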